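-- pv_equiv track=rewrite | github.com/XHJ-TS9527/Online-Chatroom | server/db/id_string_processing.py | string_plus_plus
-- ===== SOURCE A (Python) =====
-- def string_plus_plus(string):
--     """
--     Parameters
--     ----------
--     string: the string to ++
--     Returns
--     -------
--     string++
--     """
--     translate_dict = {'0': '1', '1': '2', '2': '3', '3': '4', '4': '5', '5': '6', '6': '7', '7': '8', '8': '9',
--                       '9': 'a', 'a': 'b',
--                       'b': 'c', 'c': 'd', 'd': 'e', 'e': 'f', 'f': 'g', 'g': 'h', 'h': 'i', 'i': 'j', 'j': 'k',
--                       'k': 'l', 'l': 'm',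
--                       'm': 'n', 'n': 'o', 'o': 'p', 'p': 'q', 'q': 'r', 'r': 's', 's': 't', 't': 'u', 'u': 'v',
--                       'v': 'w', 'w': 'x',
--                       'x': 'y', 'y': 'z', 'z': 'A', 'A': 'B', 'B': 'C', 'C': 'D', 'D': 'E', 'E': 'F', 'F': 'G',
--                       'G': 'H', 'H': 'I',
--                       'I': 'J', 'J': 'K', 'K': 'L', 'L': 'M', 'M': 'N', 'N': 'O', 'O': 'P', 'P': 'Q', 'Q': 'R',
--                       'R': 'S', 'S': 'T',
--                       'T': 'U', 'U': 'V', 'V': 'W', 'W': 'X', 'X': 'Y', 'Y': 'Z', 'Z': '0'}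
--     input_string = list(string)
--     input_string.reverse()
--     for idx in range(len(input_string)):
--         if input_string[idx] == 'Z':
--             flag = 1
--         else:
--             flag = 0
--         input_string[idx] = translate_dict[input_string[idx]]
--         if not flag:
--             break
--     input_string.reverse()
--     return ''.join(input_string)
-- ===== SOURCE B (Python) =====
-- _ALPHABET = '0123456789abcdefghijklmnopqrstuvwxyzABCDEFGHIJKLMNOPQRSTUVWXYZ'
-- _VAL = {c: i for i, c in enumerate(_ALPHABET)}
--
--
-- def string_plus_plus(string):
--     n = 0
--     for c in string:
--         n = n * 62 + _VAL[c]
--     n = (n + 1) % (62 ** len(string))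
--     out = []
--     for _ in range(len(string)):
--         out.append(_ALPHABET[n % 62])
--         n //= 62
--     out.reverse()
--     return ''.join(out)
-- ===== Notes on version B (the rewrite author's own statement) =====
-- stated objective: alternative
-- what changed: Replaces A's reversed-list carry-propagation loop (successor translate_dict plus break) with arithmetic: decode the string as a base-62 integer, add 1 modulo 62**len, and re-encode at fixed width.
-- outside the precondition, e.g. on string_plus_plus('A b'): A returns 'A c', B raises KeyError
import Mathlib
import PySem

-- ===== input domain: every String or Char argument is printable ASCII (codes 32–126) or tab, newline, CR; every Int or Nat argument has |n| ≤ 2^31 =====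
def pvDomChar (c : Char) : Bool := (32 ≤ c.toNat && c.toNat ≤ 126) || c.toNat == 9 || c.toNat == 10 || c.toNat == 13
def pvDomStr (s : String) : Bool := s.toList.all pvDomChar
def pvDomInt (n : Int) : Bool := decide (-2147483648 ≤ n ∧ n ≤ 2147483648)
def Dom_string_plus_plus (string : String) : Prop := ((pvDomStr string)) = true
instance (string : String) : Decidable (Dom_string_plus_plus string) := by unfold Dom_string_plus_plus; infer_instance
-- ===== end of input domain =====

-- B replaces A's reverse-scan carry loop by decoding the string as a base-62 integer,
-- adding 1 modulo 62^len, and re-encoding at fixed width (objective: alternative).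

-- the base-62 alphabet in A's carry order / B's value order
def pvAlph : List Char :=
  ['0','1','2','3','4','5','6','7','8','9','a','b','c','d','e','f','g','h','i','j','k','l','m',
   'n','o','p','q','r','s','t','u','v','w','x','y','z','A','B','C','D','E','F','G','H','I','J',
   'K','L','M','N','O','P','Q','R','S','T','U','V','W','X','Y','Z']

-- ===== PORT A =====
-- A's translate_dict: each digit maps to its successor, 'Z' wraps to '0'
def pvTransDict : PySem.Dict Char Char :=
  PySem.Dict.ofList (pvAlph.zip (pvAlph.drop 1 ++ ['0']))

-- the for-loop over the reversed character list, with its break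
def pvALoop : List Char → List Char
  | [] => []
  | c :: rest =>
    let flag := c == 'Z'
    let c' := PySem.Dict.getD pvTransDict c c   -- KeyError (c not a base-62 digit) excluded by Pre_
    if flag then c' :: pvALoop rest else c' :: rest

def string_plus_plus (string : String) : String :=
  String.ofList ((pvALoop string.toList.reverse).reverse)

-- ===== PORT B =====
-- B's _VAL = {c: i for i, c in enumerate(_ALPHABET)}
def pvValDict : PySem.Dict Char Int :=
  PySem.Dict.ofList ((PySem.List.enumerate pvAlph 0).map (fun p => (p.2, p.1)))

-- n = n * 62 + _VAL[c] over the string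
def pvBNum : List Char → Int → Int
  | [], n => n
  | c :: rest, n => pvBNum rest (n * 62 + PySem.Dict.getD pvValDict c 0)  -- KeyError excluded by Pre_

-- out.append(_ALPHABET[n % 62]); n //= 62, len(string) times
def pvBEnc : Nat → Int → List Char → List Char
  | 0, _, out => out
  | k + 1, n, out =>
    pvBEnc k (PySem.Int.floordiv n 62) (out ++ [PySem.List.pyGetD pvAlph (PySem.Int.mod n 62) '0'])

def string_plus_plus_alt (string : String) : String :=
  String.ofList ((pvBEnc string.toList.length
    (PySem.Int.mod (pvBNum string.toList 0 + 1) ((62 : Int) ^ string.toList.length)) []).reverse)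

-- ===== PRECONDITION & SPEC =====
-- Pre_ excludes strings with a character outside the base-62 alphabet: on those A either raises KeyError
-- or, when enough trailing characters are valid, returns an accidental partially-incremented string
-- (its loop never inspects the rest); B raises KeyError on all of them.
def Pre_string_plus_plus (string : String) : Prop := (string.toList.all (fun c => pvAlph.contains c)) = true
instance (string : String) : Decidable (Pre_string_plus_plus string) := by
  unfold Pre_string_plus_plus; infer_instance

def pvWitness_string_plus_plus : String := "a0"

def Spec_string_plus_plus (string : String) (out : String) : Prop := out = string_plus_plus_alt string
instance (string : String) (out : String) : Decidable (Spec_string_plus_plus string out) := by unfold Spec_string_plus_plus; infer_instance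

-- ===== CLAIM (what is proved, stated in full; the proofs are below) =====
def Claim_equal_string_plus_plus : Prop := ∀ (string : String), Dom_string_plus_plus string → Pre_string_plus_plus string → Spec_string_plus_plus string (string_plus_plus string)

-- ===== LEMMAS AND PROOFS =====

-- proof-side abstractions: digit value, digit character, base-62 value, fixed-width encoding
def pvV (c : Char) : Nat := pvAlph.idxOf c
def pvDig (m : Nat) : Char := pvAlph.getD m '0'
def pvN (l : List Char) : Nat := l.foldl (fun n c => n * 62 + pvV c) 0
def pvEnc : Nat → Nat → List Char
  | 0, _ => []
  | k + 1, n => pvEnc k (n / 62) ++ [pvDig (n % 62)]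

-- finite per-character facts (62 cases each)
set_option maxRecDepth 8000 in
theorem pv_val_eq : ∀ c ∈ pvAlph, PySem.Dict.getD pvValDict c 0 = ((pvV c : Nat) : Int) := by
  intro c hc
  fin_cases hc <;> decide
set_option maxRecDepth 8000 in
theorem pv_trans_eq : ∀ c ∈ pvAlph, PySem.Dict.getD pvTransDict c c = pvDig ((pvV c + 1) % 62) := by
  intro c hc
  fin_cases hc <;> decide
set_option maxRecDepth 8000 in
theorem pv_v_lt : ∀ c ∈ pvAlph, pvV c < 62 := by
  intro c hc
  fin_cases hc <;> decide
set_option maxRecDepth 8000 in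
theorem pv_z_iff : ∀ c ∈ pvAlph, ((c == 'Z') = true ↔ pvV c = 61) := by
  intro c hc
  fin_cases hc <;> decide
set_option maxRecDepth 8000 in
theorem pv_dig_v : ∀ c ∈ pvAlph, pvDig (pvV c) = c := by
  intro c hc
  fin_cases hc <;> decide

theorem pvN_append (l : List Char) (c : Char) : pvN (l ++ [c]) = pvN l * 62 + pvV c := by
  simp [pvN, List.foldl_append]

theorem pvN_lt (l : List Char) (h : ∀ c ∈ l, c ∈ pvAlph) : pvN l < 62 ^ l.length := by
  induction l using List.reverseRecOn with
  | nil => simp [pvN]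
  | append_singleton l c ih =>
    have hc := pv_v_lt c (h c (by simp))
    have hl := ih (fun x hx => h x (by simp [hx]))
    rw [pvN_append]
    calc pvN l * 62 + pvV c < pvN l * 62 + 62 := by omega
      _ = (pvN l + 1) * 62 := by ring
      _ ≤ 62 ^ l.length * 62 := by
          have : pvN l + 1 ≤ 62 ^ l.length := hl
          exact Nat.mul_le_mul_right 62 this
      _ = 62 ^ (l ++ [c]).length := by simp [pow_succ]

-- round-trip: a valid string re-encodes to itself
theorem pv_roundtrip (l : List Char) (h : ∀ c ∈ l, c ∈ pvAlph) : pvEnc l.length (pvN l) = l := by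
  induction l using List.reverseRecOn with
  | nil => simp [pvEnc, pvN]
  | append_singleton l c ih =>
    have hc : c ∈ pvAlph := h c (by simp)
    have hv := pv_v_lt c hc
    have hl := ih (fun x hx => h x (by simp [hx]))
    have hlen : (l ++ [c]).length = l.length + 1 := by simp
    rw [hlen, pvN_append, pvEnc]
    have h1 : (pvN l * 62 + pvV c) % 62 = pvV c := by omega
    have h2 : (pvN l * 62 + pvV c) / 62 = pvN l := by omega
    rw [h1, h2, hl, pv_dig_v c hc]

-- A's loop computes the fixed-width encoding of (value + 1) mod 62^len
theorem pvALoop_enc (l : List Char) (h : ∀ c ∈ l, c ∈ pvAlph) :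
    (pvALoop l.reverse).reverse = pvEnc l.length ((pvN l + 1) % 62 ^ l.length) := by
  induction l using List.reverseRecOn with
  | nil => simp [pvALoop, pvEnc]
  | append_singleton l c ih =>
    have hc : c ∈ pvAlph := h c (by simp)
    have hv := pv_v_lt c hc
    have hl : ∀ x ∈ l, x ∈ pvAlph := fun x hx => h x (by simp [hx])
    have hNl := pvN_lt l hl
    have hlen : (l ++ [c]).length = l.length + 1 := by simp
    rw [hlen, pvN_append]
    have hrev : (l ++ [c]).reverse = c :: l.reverse := by simp
    rw [hrev]
    by_cases hz : (c == 'Z') = true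
    · -- carry case: v c = 61
      have h61 : pvV c = 61 := (pv_z_iff c hc).mp hz
      have hM : (pvN l * 62 + pvV c + 1) % 62 ^ (l.length + 1)
          = 62 * ((pvN l + 1) % 62 ^ l.length) := by
        rw [h61]
        have : pvN l * 62 + 61 + 1 = 62 * (pvN l + 1) := by ring
        rw [this, pow_succ, mul_comm (62 ^ l.length) 62, Nat.mul_mod_mul_left]
      rw [hM, pvEnc]
      have hm0 : 62 * ((pvN l + 1) % 62 ^ l.length) % 62 = 0 := by omega
      have hd0 : 62 * ((pvN l + 1) % 62 ^ l.length) / 62 = (pvN l + 1) % 62 ^ l.length := by omega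
      rw [hm0, hd0]
      show (pvALoop (c :: l.reverse)).reverse = _
      rw [pvALoop]
      simp only [hz, if_pos]
      rw [List.reverse_cons, ih hl]
      have : PySem.Dict.getD pvTransDict c c = pvDig 0 := by
        rw [pv_trans_eq c hc, h61]
      rw [this]
    · -- no carry: v c < 61, increment last digit, prefix unchanged
      have h61 : pvV c ≠ 61 := fun he => hz ((pv_z_iff c hc).mpr he)
      have hvc : pvV c < 61 := by omega
      have hMlt : pvN l * 62 + pvV c + 1 < 62 ^ (l.length + 1) := by
        have h62 : (pvN l + 1) * 62 ≤ 62 ^ l.length * 62 := Nat.mul_le_mul_right 62 hNl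
        have hps : 62 ^ (l.length + 1) = 62 ^ l.length * 62 := pow_succ 62 l.length
        omega
      rw [Nat.mod_eq_of_lt hMlt, pvEnc]
      have hm : (pvN l * 62 + pvV c + 1) % 62 = pvV c + 1 := by omega
      have hd : (pvN l * 62 + pvV c + 1) / 62 = pvN l := by omega
      rw [hm, hd, pv_roundtrip l hl]
      show (pvALoop (c :: l.reverse)).reverse = _
      rw [pvALoop]
      simp only [hz, if_neg, Bool.false_eq_true, not_false_iff]
      rw [List.reverse_cons, List.reverse_reverse]
      have : PySem.Dict.getD pvTransDict c c = pvDig (pvV c + 1) := by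
        rw [pv_trans_eq c hc, Nat.mod_eq_of_lt (by omega)]
      rw [this]
    
-- B's number loop computes pvN
theorem pvBNum_eq (l : List Char) (h : ∀ c ∈ l, c ∈ pvAlph) (m : Nat) :
    pvBNum l (m : Int) = ((l.foldl (fun n c => n * 62 + pvV c) m : Nat) : Int) := by
  induction l generalizing m with
  | nil => simp [pvBNum]
  | cons c rest ih =>
    have hc : c ∈ pvAlph := h c (by simp)
    rw [pvBNum, pv_val_eq c hc]
    have : (m : Int) * 62 + (pvV c : Int) = ((m * 62 + pvV c : Nat) : Int) := by push_cast; ring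
    rw [this, ih (fun x hx => h x (by simp [hx]))]
    rfl

-- B's encoding loop builds pvEnc in reverse
theorem pvBEnc_eq (k : Nat) (m : Nat) (out : List Char) :
    pvBEnc k (m : Int) out = out ++ (pvEnc k m).reverse := by
  induction k generalizing m out with
  | zero => simp [pvBEnc, pvEnc]
  | succ k ih =>
    rw [pvBEnc, pvEnc]
    rw [show (62 : Int) = ((62 : Nat) : Int) from rfl]
    rw [PySem.Int.floordiv_natCast, PySem.Int.mod_natCast, PySem.List.pyGetD_natCast]
    rw [ih]
    simp [pvDig]

-- ===== VERDICT (by name: the statement is the Claim_ definition above) =====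
theorem string_plus_plus_spec : Claim_equal_string_plus_plus := by
  intro s _ hpre
  unfold Spec_string_plus_plus string_plus_plus string_plus_plus_alt
  have h : ∀ c ∈ s.toList, c ∈ pvAlph := by
    unfold Pre_string_plus_plus at hpre
    simpa using hpre
  rw [pvALoop_enc s.toList h]
  have hb : pvBNum s.toList 0 = ((pvN s.toList : Nat) : Int) := by
    have := pvBNum_eq s.toList h 0
    simpa [pvN] using this
  rw [hb]
  have hcast : ((pvN s.toList : Nat) : Int) + 1 = ((pvN s.toList + 1 : Nat) : Int) := by push_cast; ring
  have hpow : ((62 : Int) ^ s.toList.length) = ((62 ^ s.toList.length : Nat) : Int) := by push_cast; ring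
  rw [hcast, hpow, PySem.Int.mod_natCast]
  rw [pvBEnc_eq]
  simp
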